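-- pv_equiv track=rewrite | github.com/DataTrainingFoundations/EIA_Pipeline | admin_app/airflow_store.py | extract_error_excerpt
-- ===== SOURCE A (Python) =====
-- def extract_error_excerpt(log_text: str, max_lines: int = 12) -> str | None:
--     lines = [line for line in log_text.splitlines() if line.strip()]
--     if not lines:
--         return None
--     markers = ("Traceback", "ERROR", "Exception", "AnalysisException", "AirflowException")
--     matching_indexes = [index for index, line in enumerate(lines) if any(marker in line for marker in markers)]
--     if not matching_indexes:
--         return "\n".join(lines[-max_lines:])
--     start_index = max(matching_indexes[-1] - 2, 0)
--     return "\n".join(lines[start_index : start_index + max_lines])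
-- ===== SOURCE B (Python) =====
-- def extract_error_excerpt(log_text: str, max_lines: int = 12) -> str | None:
--     lines = [line for line in log_text.splitlines() if line.strip()]
--     if not lines:
--         return None
--     markers = ("Traceback", "ERROR", "Exception", "AnalysisException", "AirflowException")
--     for i in range(len(lines) - 1, -1, -1):
--         if any(marker in lines[i] for marker in markers):
--             start = max(i - 2, 0)
--             return "\n".join(lines[start : start + max_lines])
--     return "\n".join(lines[-max_lines:])
-- ===== Notes on version B (the rewrite author's own statement) =====
-- stated objective: alternative
-- what changed: Instead of building the full list of all marker-line indexes and taking its last element, B scans the non-blank lines from the end and stops at the first (i.e. last) marker line, then slices the same window.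
import Mathlib
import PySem

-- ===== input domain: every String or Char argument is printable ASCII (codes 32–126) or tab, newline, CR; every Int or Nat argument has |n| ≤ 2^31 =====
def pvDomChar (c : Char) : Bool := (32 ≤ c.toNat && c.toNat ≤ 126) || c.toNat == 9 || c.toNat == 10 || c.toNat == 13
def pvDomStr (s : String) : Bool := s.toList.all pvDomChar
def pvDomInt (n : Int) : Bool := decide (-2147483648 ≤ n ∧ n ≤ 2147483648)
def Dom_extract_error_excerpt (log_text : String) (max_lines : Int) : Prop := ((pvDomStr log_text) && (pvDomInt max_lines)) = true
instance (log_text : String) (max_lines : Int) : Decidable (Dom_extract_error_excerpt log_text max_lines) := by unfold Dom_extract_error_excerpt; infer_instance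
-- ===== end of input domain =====

-- B replaces A's full forward index-collection pass with a reverse scan that stops at the
-- last marker line (alternative decomposition; same return value everywhere).

-- ===== PORT A =====
def markersA : List String :=
  ["Traceback", "ERROR", "Exception", "AnalysisException", "AirflowException"]

def hasMarkerA (line : String) : Bool :=
  markersA.any (fun m => PySem.Str.isIn m line)

def extract_error_excerpt (log_text : String) (max_lines : Int) : Option String :=
  let lines := (PySem.Str.splitlines log_text).filter (fun l => !(PySem.Str.strip l == ""))
  if lines = [] then none
  else
    let matching_indexes :=
      ((PySem.List.enumerate lines 0).filter (fun p => hasMarkerA p.2)).map (fun p => p.1)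
    if matching_indexes = [] then
      some (PySem.Str.join "\n" (PySem.List.slice lines (some (-max_lines)) none))
    else
      -- matching_indexes[-1] on the (guarded) nonempty list
      let start_index := max (matching_indexes.getLastD 0 - 2) 0
      some (PySem.Str.join "\n" (PySem.List.slice lines (some start_index) (some (start_index + max_lines))))

-- ===== PORT B =====
def markersB : List String :=
  ["Traceback", "ERROR", "Exception", "AnalysisException", "AirflowException"]

def hasMarkerB (line : String) : Bool :=
  markersB.any (fun m => PySem.Str.isIn m line)

-- the 'for i in range(len(lines)-1, -1, -1): if any(...): return' loop: first index in the
-- countdown list whose line contains a marker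
def findHitB (lines : List String) : List Int → Option Int
  | [] => none
  | i :: rest =>
      if hasMarkerB (PySem.List.pyGetD lines i "") then some i else findHitB lines rest

def extract_error_excerpt_alt (log_text : String) (max_lines : Int) : Option String :=
  let lines := (PySem.Str.splitlines log_text).filter (fun l => !(PySem.Str.strip l == ""))
  if lines = [] then none
  else
    match findHitB lines (PySem.List.pyRange ((lines.length : Int) - 1) (-1) (-1)) with
    | some i =>
        let start := max (i - 2) 0
        some (PySem.Str.join "\n" (PySem.List.slice lines (some start) (some (start + max_lines))))
    | none =>
        some (PySem.Str.join "\n" (PySem.List.slice lines (some (-max_lines)) none))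

-- ===== PRECONDITION & SPEC =====
def Spec_extract_error_excerpt (log_text : String) (max_lines : Int) (out : Option String) : Prop := out = extract_error_excerpt_alt log_text max_lines
instance (log_text : String) (max_lines : Int) (out : Option String) : Decidable (Spec_extract_error_excerpt log_text max_lines out) := by unfold Spec_extract_error_excerpt; infer_instance

-- ===== CLAIM (what is proved, stated in full; the proofs are below) =====
def Claim_equal_extract_error_excerpt : Prop := ∀ (log_text : String) (max_lines : Int), Dom_extract_error_excerpt log_text max_lines → Spec_extract_error_excerpt log_text max_lines (extract_error_excerpt log_text max_lines)

-- ===== LEMMAS AND PROOFS =====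

theorem find?_eq_head?_filter {α : Type} (q : α → Bool) (l : List α) :
    l.find? q = (l.filter q).head? := by
  induction l with
  | nil => rfl
  | cons x xs ih =>
      rw [List.find?_cons, List.filter_cons]
      by_cases h : q x
      · simp [h]
      · simp only [h]; simpa using ih

-- B's loop is List.find? over the countdown index list
theorem findHitB_eq_find? (lines : List String) (idxs : List Int) :
    findHitB lines idxs = idxs.find? (fun i => hasMarkerB (PySem.List.pyGetD lines i "")) := by
  induction idxs with
  | nil => rfl
  | cons i rest ih =>
      rw [findHitB, List.find?_cons]
      by_cases h : hasMarkerB (PySem.List.pyGetD lines i "")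
      · simp [h]
      · simp [h, ih]

-- A's matching_indexes list, characterised as a filtered index range
theorem matching_eq_filter (lines : List String) :
    ((PySem.List.enumerate lines 0).filter (fun p => hasMarkerA p.2)).map (fun p => p.1)
      = (PySem.List.pyRange 0 (lines.length : Int) 1).filter
          (fun i => hasMarkerA (PySem.List.pyGetD lines i "")) := by
  have h := PySem.List.enumerate_eq_map_pyRange lines ""
  rw [show PySem.List.len lines = (lines.length : Int) from by simp] at h
  rw [h, List.filter_map, List.map_map]
  simp only [Function.comp_def]
  simp

-- ===== VERDICT (by name: the statement is the Claim_ definition above) =====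
theorem extract_error_excerpt_spec : Claim_equal_extract_error_excerpt := by
  intro log_text max_lines _
  unfold Spec_extract_error_excerpt extract_error_excerpt extract_error_excerpt_alt
  set L := (PySem.Str.splitlines log_text).filter (fun l => !(PySem.Str.strip l == "")) with hL
  by_cases hnil : L = []
  · simp [hnil]
  · simp only [hnil, if_false]
    have hAB : hasMarkerB = hasMarkerA := rfl
    have hrange : PySem.List.pyRange ((L.length : Int) - 1) (-1) (-1)
        = (PySem.List.pyRange 0 (L.length : Int) 1).reverse := by
      rw [PySem.List.pyRange_neg_one_eq_reverse]; norm_num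
    have hB : findHitB L (PySem.List.pyRange ((L.length : Int) - 1) (-1) (-1))
        = (((PySem.List.enumerate L 0).filter (fun p => hasMarkerA p.2)).map (fun p => p.1)).getLast? := by
      rw [findHitB_eq_find?, hrange, hAB, find?_eq_head?_filter,
        List.filter_reverse, List.head?_reverse, matching_eq_filter]
    rw [hB]
    set M := ((PySem.List.enumerate L 0).filter (fun p => hasMarkerA p.2)).map (fun p => p.1) with hM
    cases hlast : M.getLast? with
    | none =>
        have : M = [] := List.getLast?_eq_none_iff.mp hlast
        simp [this]
    | some i =>
        have hMne : M ≠ [] := by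
          intro h; rw [h] at hlast; simp at hlast
        simp [hMne, List.getLastD_eq_getLast?, hlast]
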